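-- pv_equiv track=rewrite | github.com/ece-jacob-scott/advent-of-code | year-2023/day-3/main.py | number_coordinates
-- ===== SOURCE A (Python) =====
-- from typing import List, Dict, Set, Tuple
--
-- def number_coordinates(input_lines: List[str]) -> Dict[Tuple[int, int], int]:
--     parts = {}
--     parsing = False
--     right_edge = -1
--
--     for y, line in enumerate(input_lines):
--         line += "."  # makes my life easier
--         for x, c in enumerate(line):
--             if not parsing and c.isdigit():
--                 right_edge = x
--                 parsing = True
--
--             if parsing and (not c.isdigit()):
--                 for i in range(right_edge, x):
--                     parts[(y, i)] = int(line[right_edge:x])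
--                 parsing = False
--
--     # if parsing:
--     #     for i in range(right_edge, len(input_lines[0])):
--     #         parts[(y, i)] = int(line[right_edge:x])
--
--     return parts
-- ===== SOURCE B (Python) =====
-- from typing import List, Dict, Tuple
--
--
-- def number_coordinates(input_lines: List[str]) -> Dict[Tuple[int, int], int]:
--     # Per-cell brute force: each digit coordinate independently locates the
--     # maximal digit run that contains it (scan left, scan right) and maps to
--     # the int of that run.  No run-level state is carried between cells.
--     parts = {}
--     for y, line in enumerate(input_lines):
--         for x, c in enumerate(line):
--             if c.isdigit():
--                 start = x
--                 while start > 0 and line[start - 1].isdigit():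
--                     start -= 1
--                 end = x + 1
--                 while end < len(line) and line[end].isdigit():
--                     end += 1
--                 parts[(y, x)] = int(line[start:end])
--     return parts
-- ===== Notes on version B (the rewrite author's own statement) =====
-- stated objective: alternative
-- what changed: Replaces A's cross-line run state machine (parsing flag, right_edge, sentinel '.') by a per-cell brute force: every digit coordinate independently finds the maximal digit run containing it by scanning left and right from that cell, and maps to the int of that run; no run state is carried between cells.
import Mathlib
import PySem

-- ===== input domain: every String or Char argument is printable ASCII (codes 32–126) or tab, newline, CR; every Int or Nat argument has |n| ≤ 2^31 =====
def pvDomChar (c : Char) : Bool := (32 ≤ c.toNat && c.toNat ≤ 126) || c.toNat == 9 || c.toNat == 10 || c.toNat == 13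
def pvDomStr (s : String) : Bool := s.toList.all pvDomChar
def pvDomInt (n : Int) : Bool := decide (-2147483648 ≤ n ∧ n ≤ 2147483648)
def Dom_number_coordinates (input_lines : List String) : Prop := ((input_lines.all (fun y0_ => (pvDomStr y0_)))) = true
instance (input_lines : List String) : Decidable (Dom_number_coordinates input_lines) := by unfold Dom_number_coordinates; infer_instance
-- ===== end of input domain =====

-- B replaces A's cross-line run state machine (parsing flag / right_edge / sentinel '.') by a
-- per-cell brute force: each digit coordinate independently locates its maximal digit run by
-- scanning left and right from that cell ("alternative"; similar cost, no run state).

-- Python dict assignment parts[(y,i)] = v on an insertion-ordered dict, entries kept as (y,i,v)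
-- triples (shared by both ports: it is the dict semantics, not part of either algorithm).
def dinsert (ps : List (Int × Int × Int)) (y i v : Int) : List (Int × Int × Int) :=
  if ps.any (fun t => t.1 == y && t.2.1 == i)
  then ps.map (fun t => if t.1 == y && t.2.1 == i then (y, i, v) else t)
  else ps ++ [(y, i, v)]

-- ===== PORT A =====
-- body of A's inner `for x, c in enumerate(line)` loop; state = (parts, parsing, right_edge)
def stepA (cs : List Char) (y : Int) (st : List (Int × Int × Int) × Bool × Int)
    (p : Int × Char) : List (Int × Int × Int) × Bool × Int :=
  let pr : Bool × Int :=
    if !st.2.1 && PySem.Chars.isdigit p.2 then (true, p.1) else (st.2.1, st.2.2)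
  if pr.1 && !(PySem.Chars.isdigit p.2) then
    -- for i in range(right_edge, x): parts[(y,i)] = int(line[right_edge:x])
    -- int(...) ported as (ofChars? ...).getD 0; exact here: the slice is a nonempty digit run
    ((PySem.List.pyRange pr.2 p.1 1).foldl
        (fun ps i =>
          dinsert ps y i
            ((PySem.Int.ofChars? (PySem.List.slice cs (some pr.2) (some p.1))).getD 0))
        st.1,
      false, pr.2)
  else (st.1, pr.1, pr.2)

def number_coordinates (input_lines : List String) : List (Int × Int × Int) :=
  let st :=
    (PySem.List.enumerate input_lines 0).foldl
      (fun st yl =>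
        let cs := yl.2.toList ++ ['.']   -- line += "."
        (PySem.List.enumerate cs 0).foldl (stepA cs yl.1) st)
      ([], false, -1)
  st.1

-- ===== PORT B =====
-- `while start > 0 and line[start-1].isdigit(): start -= 1`; indices stay ≥ 0 so Nat is exact,
-- and the guarded access line[start-1] is always in range (getD default is never read)
def leftScan (cs : List Char) : Nat → Nat
  | 0 => 0
  | s + 1 => if PySem.Chars.isdigit (cs.getD s ' ') then leftScan cs s else s + 1

-- `end = x+1; while end < len(line) and line[end].isdigit(): end += 1`
def rightScan (cs : List Char) (e : Nat) : Nat :=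
  if h : e < cs.length then
    if PySem.Chars.isdigit cs[e] then rightScan cs (e + 1) else e
  else e
termination_by cs.length - e

-- value assigned to digit cell x: int(line[start:end]) for its enclosing maximal digit run
def cellVal (cs : List Char) (x : Nat) : Int :=
  let s := leftScan cs x
  let e := rightScan cs (x + 1)
  (PySem.Int.ofChars? (PySem.List.slice cs (some (s : Int)) (some (e : Int)))).getD 0

def number_coordinates_alt (input_lines : List String) : List (Int × Int × Int) :=
  (PySem.List.enumerate input_lines 0).foldl
    (fun ps yl =>
      (PySem.List.enumerate yl.2.toList 0).foldl
        (fun ps xc =>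
          if PySem.Chars.isdigit xc.2 then
            dinsert ps yl.1 xc.1 (cellVal yl.2.toList xc.1.toNat)   -- x ≥ 0: toNat is exact
          else ps)
        ps)
    []

-- ===== PRECONDITION & SPEC =====
def Spec_number_coordinates (input_lines : List String) (out : List (Int × Int × Int)) : Prop := out = number_coordinates_alt input_lines
instance (input_lines : List String) (out : List (Int × Int × Int)) : Decidable (Spec_number_coordinates input_lines out) := by unfold Spec_number_coordinates; infer_instance

-- ===== CLAIM (what is proved, stated in full; the proofs are below) =====
def Claim_equal_number_coordinates : Prop := ∀ (input_lines : List String), Dom_number_coordinates input_lines → Spec_number_coordinates input_lines (number_coordinates input_lines)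

-- ===== LEMMAS AND PROOFS =====

def dinsertAll (ps : List (Int × Int × Int)) (l : List (Int × Int × Int)) :
    List (Int × Int × Int) :=
  l.foldl (fun ps t => dinsert ps t.1 t.2.1 t.2.2) ps

-- the assignments produced by one maximal digit run `run` starting at column s
def runAsg (y s : Int) (run : List Char) : List (Int × Int × Int) :=
  (PySem.List.pyRange s (s + run.length) 1).map
    (fun i => (y, i, (PySem.Int.ofChars? run).getD 0))

-- specification of the assignment sequence of one line (asgP: inside a run started at s)
mutual
def asg (y x : Int) (cs : List Char) : List (Int × Int × Int) :=
  match cs with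
  | [] => []
  | c :: rest =>
    if PySem.Chars.isdigit c then asgP y x [c] rest else asg y (x + 1) rest

def asgP (y s : Int) (run : List Char) (cs : List Char) : List (Int × Int × Int) :=
  match cs with
  | [] => []
  | c :: rest =>
    if PySem.Chars.isdigit c then asgP y s (run ++ [c]) rest
    else runAsg y s run ++ asg y (s + run.length + 1) rest
end

theorem dinsertAll_append (ps : List (Int × Int × Int)) (a b : List (Int × Int × Int)) :
    dinsertAll ps (a ++ b) = dinsertAll (dinsertAll ps a) b := by
  simp [dinsertAll]

theorem foldl_dinsert_map (ps : List (Int × Int × Int)) (l : List Int) (y v : Int) :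
    l.foldl (fun ps i => dinsert ps y i v) ps
      = dinsertAll ps (l.map (fun i => (y, i, v))) := by
  simp [dinsertAll, List.foldl_map]

def endsND (cs : List Char) : Prop :=
  ∀ c, cs.getLast? = some c → PySem.Chars.isdigit c = false

theorem endsND_tail {c : Char} {rest : List Char} (h : endsND (c :: rest)) (hne : rest ≠ []) :
    endsND rest := by
  intro d hd
  apply h d
  cases rest with
  | nil => exact absurd rfl hne
  | cons a l => simpa [List.getLast?_cons] using hd

theorem endsND_head_digit {c : Char} {rest : List Char} (h : endsND (c :: rest))
    (hd : PySem.Chars.isdigit c = true) : rest ≠ [] := by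
  intro hrest
  subst hrest
  have := h c (by simp)
  simp [this] at hd

-- core invariant of A's character state machine, by strong induction on the remaining suffix
theorem machineA : ∀ (n : Nat) (suffix : List Char), suffix.length ≤ n →
    (∀ (y : Int) (pre : List Char) (parts : List (Int × Int × Int)) (r : Int),
      endsND suffix →
      ∃ r', (PySem.List.enumerate suffix (pre.length : Int)).foldl
              (stepA (pre ++ suffix) y) (parts, false, r)
            = (dinsertAll parts (asg y (pre.length : Int) suffix), false, r'))
    ∧
    (∀ (y : Int) (pre run : List Char) (parts : List (Int × Int × Int)),
      run ≠ [] → (∀ c ∈ run, PySem.Chars.isdigit c = true) → suffix ≠ [] → endsND suffix →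
      ∃ r', (PySem.List.enumerate suffix ((pre.length : Int) + (run.length : Int))).foldl
              (stepA (pre ++ run ++ suffix) y) (parts, true, (pre.length : Int))
            = (dinsertAll parts (asgP y (pre.length : Int) run suffix), false, r')) := by
  intro n
  induction n with
  | zero =>
    intro suffix hlen
    have hs : suffix = [] := List.length_eq_zero_iff.mp (Nat.le_zero.mp hlen)
    subst hs
    constructor
    · intro y pre parts r _
      exact ⟨r, by simp [PySem.List.enumerate, dinsertAll, asg]⟩
    · intro _ _ _ _ _ _ hne _; exact absurd rfl hne
  | succ n ih =>
    intro suffix hlen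
    match suffix with
    | [] =>
      constructor
      · intro y pre parts r _
        exact ⟨r, by simp [PySem.List.enumerate, dinsertAll, asg]⟩
      · intro _ _ _ _ _ _ hne _; exact absurd rfl hne
    | c :: rest =>
      have hrest : rest.length ≤ n := by simpa using hlen
      constructor
      · -- P1: not currently parsing
        intro y pre parts r hend
        by_cases hd : PySem.Chars.isdigit c = true
        · have hrne : rest ≠ [] := endsND_head_digit hend hd
          obtain ⟨r', hr⟩ := (ih rest hrest).2 y pre [c] parts (by simp)
            (by simp [hd]) hrne (endsND_tail hend hrne)
          refine ⟨r', ?_⟩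
          rw [PySem.List.enumerate_cons, List.foldl_cons]
          have hstep : stepA (pre ++ c :: rest) y (parts, false, r) ((pre.length : Int), c)
              = (parts, true, (pre.length : Int)) := by
            simp [stepA, hd]
          rw [hstep]
          simpa [asg, hd] using hr
        · have hend' : endsND rest := by
            cases rest with
            | nil => intro d hd'; simp at hd'
            | cons a l => exact endsND_tail hend (by simp)
          obtain ⟨r', hr⟩ := (ih rest hrest).1 y (pre ++ [c]) parts r hend'
          refine ⟨r', ?_⟩
          rw [PySem.List.enumerate_cons, List.foldl_cons]
          have hstep : stepA (pre ++ c :: rest) y (parts, false, r) ((pre.length : Int), c)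
              = (parts, false, r) := by
            simp [stepA, hd]
          rw [hstep]
          simpa [asg, hd] using hr
      · -- P2: currently parsing a run
        intro y pre run parts hrun hdig _ hend
        by_cases hd : PySem.Chars.isdigit c = true
        · have hrne : rest ≠ [] := endsND_head_digit hend hd
          obtain ⟨r', hr⟩ := (ih rest hrest).2 y pre (run ++ [c]) parts (by simp)
            (by intro d hdm; rcases List.mem_append.mp hdm with h1 | h1
                · exact hdig d h1
                · simp at h1; simpa [h1] using hd) hrne (endsND_tail hend hrne)
          refine ⟨r', ?_⟩
          rw [PySem.List.enumerate_cons, List.foldl_cons]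
          have hstep : stepA (pre ++ run ++ c :: rest) y (parts, true, (pre.length : Int))
              (((pre.length : Int) + (run.length : Int)), c)
              = (parts, true, (pre.length : Int)) := by
            simp [stepA, hd]
          rw [hstep]
          have : asgP y (pre.length : Int) run (c :: rest)
              = asgP y (pre.length : Int) (run ++ [c]) rest := by
            simp [asgP, hd]
          rw [this]
          simpa [add_assoc] using hr
        · have hend' : endsND rest := by
            cases rest with
            | nil => intro d hd'; simp at hd'
            | cons a l => exact endsND_tail hend (by simp)
          have hslice : PySem.List.slice (pre ++ (run ++ c :: rest))
              (some (pre.length : Int)) (some ((pre.length : Int) + (run.length : Int))) = run := by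
            rw [PySem.List.slice_natCast_add, List.drop_left, List.take_left]
          set v : Int := (PySem.Int.ofChars? run).getD 0 with hv
          set parts' : List (Int × Int × Int) :=
            (PySem.List.pyRange (pre.length : Int) ((pre.length : Int) + (run.length : Int)) 1).foldl
              (fun ps i => dinsert ps y i v) parts with hp'
          have hstep : stepA (pre ++ run ++ c :: rest) y (parts, true, (pre.length : Int))
              (((pre.length : Int) + (run.length : Int)), c)
              = (parts', false, (pre.length : Int)) := by
            simp [stepA, hd, hslice, hp', hv]
          obtain ⟨r', hr⟩ := (ih rest hrest).1 y (pre ++ run ++ [c]) parts' (pre.length : Int) hend'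
          refine ⟨r', ?_⟩
          rw [PySem.List.enumerate_cons, List.foldl_cons, hstep]
          have hparts' : parts' = dinsertAll parts (runAsg y (pre.length : Int) run) := by
            rw [hp', foldl_dinsert_map, runAsg]
          have hasgP : asgP y (pre.length : Int) run (c :: rest)
              = runAsg y (pre.length : Int) run ++ asg y ((pre.length : Int) + (run.length : Int) + 1) rest := by
            simp [asgP, hd]
          rw [hasgP, dinsertAll_append, ← hparts']
          simpa [add_assoc] using hr

-- the assignment sequence of one line in run decomposition (takeWhile/dropWhile)
def asgB (y x : Int) (cs : List Char) : List (Int × Int × Int) :=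
  match cs with
  | [] => []
  | c :: rest =>
    if PySem.Chars.isdigit c then
      let run := (c :: rest).takeWhile PySem.Chars.isdigit
      runAsg y x run ++ asgB y (x + run.length) ((c :: rest).dropWhile PySem.Chars.isdigit)
    else asgB y (x + 1) rest
termination_by cs.length
decreasing_by
  · simp only [List.dropWhile_cons_of_pos (by simpa using ‹PySem.Chars.isdigit c = true›)]
    exact Nat.lt_succ_of_le (List.length_dropWhile_le _ _)
  · simp

-- the run decomposition equals A's sentinel-closed assignment sequence
theorem asgB_eq_asg : ∀ (n : Nat) (cs : List Char), cs.length ≤ n →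
    (∀ (y x : Int), asgB y x cs = asg y x (cs ++ ['.'])) ∧
    (∀ (y s : Int) (run : List Char), run ≠ [] → (∀ c ∈ run, PySem.Chars.isdigit c = true) →
      asgP y s run (cs ++ ['.'])
        = runAsg y s (run ++ cs.takeWhile PySem.Chars.isdigit)
          ++ asgB y (s + run.length + (cs.takeWhile PySem.Chars.isdigit).length)
              (cs.dropWhile PySem.Chars.isdigit)) := by
  intro n
  induction n with
  | zero =>
    intro cs hlen
    have : cs = [] := List.length_eq_zero_iff.mp (Nat.le_zero.mp hlen)
    subst this
    constructor
    · intro y x; simp [asgB, asg, asgP]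
    · intro y s run _ _
      simp [asgP, asgB, asg, show PySem.Chars.isdigit '.' = false from by decide]
  | succ n ih =>
    intro cs hlen
    match cs with
    | [] =>
      constructor
      · intro y x; simp [asgB, asg, asgP]
      · intro y s run _ _
        simp [asgP, asgB, asg, show PySem.Chars.isdigit '.' = false from by decide]
    | c :: rest =>
      have hrest : rest.length ≤ n := by simpa using hlen
      constructor
      · intro y x
        by_cases hd : PySem.Chars.isdigit c = true
        · rw [asgB]
          simp only [hd, if_true]
          have h2 := (ih rest hrest).2 y x [c] (by simp) (by simp [hd])
          rw [show (c :: rest) ++ ['.'] = c :: (rest ++ ['.']) by simp, asg]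
          simp only [hd, if_true]
          rw [h2]
          simp [hd, add_comm, add_left_comm]
        · rw [asgB]
          simp only [hd]
          rw [show (c :: rest) ++ ['.'] = c :: (rest ++ ['.']) by simp, asg]
          simp only [hd]
          exact (ih rest hrest).1 y (x + 1)
      · intro y s run hrun hdig
        by_cases hd : PySem.Chars.isdigit c = true
        · rw [show (c :: rest) ++ ['.'] = c :: (rest ++ ['.']) by simp, asgP]
          simp only [hd, if_true]
          have h2 := (ih rest hrest).2 y s (run ++ [c]) (by simp)
            (by intro d hdm; rcases List.mem_append.mp hdm with h1 | h1
                · exact hdig d h1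
                · simp at h1; simpa [h1] using hd)
          rw [h2]
          simp [hd, add_comm, add_assoc, add_left_comm]
        · rw [show (c :: rest) ++ ['.'] = c :: (rest ++ ['.']) by simp, asgP, if_neg hd]
          rw [← (ih rest hrest).1 y (s + run.length + 1)]
          rw [List.takeWhile_cons_of_neg (by simpa using hd),
              List.dropWhile_cons_of_neg (by simpa using hd)]
          rw [asgB, if_neg hd]
          simp

-- ===== B-side lemmas =====

-- the assignment list B's per-cell scan produces for the cells [k, …) of `full`
def cellAsg (y : Int) (full : List Char) : Nat → List Char → List (Int × Int × Int)
  | _, [] => []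
  | k, c :: rest =>
    (if PySem.Chars.isdigit c then [(y, (k : Int), cellVal full k)] else [])
      ++ cellAsg y full (k + 1) rest

theorem foldB_eq (y : Int) : ∀ (suffix full : List Char) (k : Nat) (ps : List (Int × Int × Int)),
    (PySem.List.enumerate suffix (k : Int)).foldl
        (fun ps xc =>
          if PySem.Chars.isdigit xc.2 then dinsert ps y xc.1 (cellVal full xc.1.toNat) else ps)
        ps
      = dinsertAll ps (cellAsg y full k suffix) := by
  intro suffix
  induction suffix with
  | nil => intro full k ps; simp [PySem.List.enumerate, cellAsg, dinsertAll]
  | cons c rest ih =>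
    intro full k ps
    rw [PySem.List.enumerate_cons, List.foldl_cons]
    by_cases hd : PySem.Chars.isdigit c = true
    · simp only [hd, if_true, Int.toNat_natCast]
      rw [show ((k : Int) + 1) = ((k + 1 : Nat) : Int) by push_cast; ring, ih]
      simp [cellAsg, hd, dinsertAll]
    · simp only [hd, cellAsg]
      rw [show ((k : Int) + 1) = ((k + 1 : Nat) : Int) by push_cast; ring, ih]
      simp

theorem getD_append_concat (q X : List Char) (d : Char) :
    ((q ++ [d]) ++ X).getD q.length ' ' = d := by
  rw [List.getD_eq_getElem?_getD, List.getElem?_append_left (by simp), List.getElem?_concat_length]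
  rfl

theorem leftScan_spec : ∀ (j : Nat) (pre run rest : List Char),
    (∀ c ∈ run, PySem.Chars.isdigit c = true) →
    (pre = [] ∨ ∃ d, pre.getLast? = some d ∧ PySem.Chars.isdigit d = false) →
    j ≤ run.length →
    leftScan (pre ++ run ++ rest) (pre.length + j) = pre.length := by
  intro j
  induction j with
  | zero =>
    intro pre run rest _ hpre _
    rcases hpre with h | ⟨d, hlast, hnd⟩
    · subst h; simp [leftScan]
    · obtain ⟨q, hq⟩ := List.getLast?_eq_some_iff.mp hlast
      subst hq
      have : (q ++ [d]).length + 0 = q.length + 1 := by simp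
      rw [this, leftScan, List.append_assoc (q ++ [d]) run rest]
      rw [getD_append_concat q (run ++ rest) d, hnd]
      simp
  | succ j ih =>
    intro pre run rest hrun hpre hj
    have hj' : j < run.length := by omega
    have : pre.length + (j + 1) = (pre.length + j) + 1 := by omega
    rw [this, leftScan]
    have hget : (pre ++ run ++ rest).getD (pre.length + j) ' ' = run[j] := by
      rw [List.getD_eq_getElem?_getD, List.append_assoc,
          List.getElem?_append_right (by simp)]
      rw [List.getElem?_append_left (by simpa using hj')]
      simp [List.getElem?_eq_getElem hj']
    rw [hget, if_pos (hrun _ (List.getElem_mem hj'))]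
    exact ih pre run rest hrun hpre (by omega)

theorem rightScan_spec : ∀ (run2 pre1 rest : List Char),
    (∀ c ∈ run2, PySem.Chars.isdigit c = true) →
    (∀ c, rest.head? = some c → PySem.Chars.isdigit c = false) →
    rightScan (pre1 ++ run2 ++ rest) pre1.length = pre1.length + run2.length := by
  intro run2
  induction run2 with
  | nil =>
    intro pre1 rest _ hrest
    cases rest with
    | nil => rw [rightScan]; simp
    | cons c t =>
      rw [rightScan]
      have hlt : pre1.length < (pre1 ++ [] ++ c :: t).length := by simp
      rw [dif_pos hlt]
      have : (pre1 ++ [] ++ c :: t)[pre1.length]'hlt = c := by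
        rw [List.getElem_eq_iff]
        simp only [List.append_nil]
        rw [List.getElem?_append_right (le_refl _)]
        simp
      rw [this, hrest c rfl]
      simp
  | cons c r2 ih =>
    intro pre1 rest hdig hrest
    rw [rightScan]
    have hlt : pre1.length < (pre1 ++ c :: r2 ++ rest).length := by simp
    rw [dif_pos hlt]
    have hc : (pre1 ++ c :: r2 ++ rest)[pre1.length]'hlt = c := by
      rw [List.getElem_eq_iff, List.append_assoc, List.getElem?_append_right (le_refl _)]
      simp
    rw [hc, if_pos (hdig c (by simp))]
    have hre : pre1 ++ c :: r2 ++ rest = (pre1 ++ [c]) ++ r2 ++ rest := by simp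
    have hlen : pre1.length + 1 = (pre1 ++ [c]).length := by simp
    rw [hre, hlen, ih (pre1 ++ [c]) rest (fun d hd => hdig d (by simp [hd])) hrest]
    simp only [List.length_append, List.length_cons, List.length_nil]
    omega

theorem cellVal_run (pre run rest : List Char) (j : Nat)
    (hrun : ∀ c ∈ run, PySem.Chars.isdigit c = true)
    (hpre : pre = [] ∨ ∃ d, pre.getLast? = some d ∧ PySem.Chars.isdigit d = false)
    (hrest : ∀ c, rest.head? = some c → PySem.Chars.isdigit c = false)
    (hj : j < run.length) :
    cellVal (pre ++ run ++ rest) (pre.length + j) = (PySem.Int.ofChars? run).getD 0 := by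
  have hs : leftScan (pre ++ run ++ rest) (pre.length + j) = pre.length :=
    leftScan_spec j pre run rest hrun hpre (le_of_lt hj)
  have hsplit : pre ++ run ++ rest = (pre ++ run.take (j + 1)) ++ run.drop (j + 1) ++ rest := by
    simp [List.append_assoc]
  have hlen1 : (pre ++ run.take (j + 1)).length = pre.length + (j + 1) := by
    simp [List.length_take]; omega
  have he : rightScan (pre ++ run ++ rest) (pre.length + j + 1) = pre.length + run.length := by
    rw [hsplit, show pre.length + j + 1 = (pre ++ run.take (j + 1)).length by omega,
        rightScan_spec (run.drop (j + 1)) _ rest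
          (fun c hc => hrun c (List.mem_of_mem_drop hc)) hrest]
    simp only [List.length_append, List.length_take, List.length_drop]
    omega
  simp only [cellVal]
  rw [hs, he]
  rw [show ((pre.length + run.length : Nat) : Int)
        = ((pre.length : Nat) : Int) + ((run.length : Nat) : Int) by push_cast; ring]
  rw [List.append_assoc, PySem.List.slice_natCast_add, List.drop_left, List.take_left]

theorem cellAsg_chunk (y v : Int) : ∀ (run2 : List Char) (full : List Char) (k : Nat)
    (rest : List Char),
    (∀ c ∈ run2, PySem.Chars.isdigit c = true) →
    (∀ j, j < run2.length → cellVal full (k + j) = v) →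
    cellAsg y full k (run2 ++ rest)
      = (List.range run2.length).map (fun j => (y, ((k + j : Nat) : Int), v))
        ++ cellAsg y full (k + run2.length) rest := by
  intro run2
  induction run2 with
  | nil => intro full k rest _ _; simp
  | cons c r2 ih =>
    intro full k rest hd hv
    have h0 : cellVal full k = v := by simpa using hv 0 (by simp)
    have hih := ih full (k + 1) rest (fun d hdm => hd d (by simp [hdm]))
      (fun j hj => by
        have := hv (j + 1) (by simpa using Nat.succ_lt_succ hj)
        simpa [Nat.add_assoc, Nat.add_comm 1 j] using this)
    simp only [List.cons_append, cellAsg, hd c (by simp), if_pos, h0]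
    rw [hih]
    have hmap : List.map (fun j => (y, ((k + 1 + j : Nat) : Int), v)) (List.range r2.length)
        = List.map ((fun j => (y, ((k + j : Nat) : Int), v)) ∘ Nat.succ) (List.range r2.length) := by
      apply List.map_congr_left
      intro j _
      simp only [Function.comp]
      congr 2
      omega
    rw [hmap, show k + 1 + r2.length = k + (r2.length + 1) by omega]
    simp [List.range_succ_eq_map, List.map_map]

theorem head?_dropWhile {p : Char → Bool} : ∀ (l : List Char) (c : Char),
    (l.dropWhile p).head? = some c → p c = false := by
  intro l
  induction l with
  | nil => intro c h; simp at h
  | cons a t ih =>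
    intro c h
    by_cases hp : p a = true
    · rw [List.dropWhile_cons_of_pos hp] at h; exact ih c h
    · rw [List.dropWhile_cons_of_neg hp] at h
      simp at h
      subst h
      simpa using hp

theorem cellAsg_eq_asgB (y : Int) : ∀ (n : Nat) (cs : List Char), cs.length ≤ n →
    ∀ (pre : List Char),
    (∀ c, cs.head? = some c → PySem.Chars.isdigit c = true →
      (pre = [] ∨ ∃ d, pre.getLast? = some d ∧ PySem.Chars.isdigit d = false)) →
    cellAsg y (pre ++ cs) pre.length cs = asgB y (pre.length : Int) cs := by
  intro n
  induction n with
  | zero =>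
    intro cs hlen pre _
    have : cs = [] := List.length_eq_zero_iff.mp (Nat.le_zero.mp hlen)
    subst this; simp [cellAsg, asgB]
  | succ n ih =>
    intro cs hlen pre hb
    match cs with
    | [] => simp [cellAsg, asgB]
    | c :: rest =>
      have hrest : rest.length ≤ n := by simpa using hlen
      by_cases hd : PySem.Chars.isdigit c = true
      · -- a digit cell: the chunk of its maximal run, then recurse after the run
        set run := (c :: rest).takeWhile PySem.Chars.isdigit with hrundef
        set rest' := (c :: rest).dropWhile PySem.Chars.isdigit with hrest'def
        have hcs : c :: rest = run ++ rest' := (List.takeWhile_append_dropWhile).symm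
        have hrundig : ∀ d ∈ run, PySem.Chars.isdigit d = true := by
          intro d hdm
          exact List.mem_takeWhile_imp hdm
        have hrest'h : ∀ d, rest'.head? = some d → PySem.Chars.isdigit d = false := by
          intro d hdm; exact head?_dropWhile _ d hdm
        have hrest'len : rest'.length ≤ n := by
          rw [hrest'def, List.dropWhile_cons_of_pos hd]
          calc (rest.dropWhile PySem.Chars.isdigit).length
              ≤ rest.length := List.length_dropWhile_le _ _
            _ ≤ n := hrest
        have hpre := hb c rfl hd
        -- left side: the run chunk, then the tail handled by the IH with prefix pre ++ run
        have hv : ∀ j, j < run.length →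
            cellVal (pre ++ (c :: rest)) (pre.length + j) = (PySem.Int.ofChars? run).getD 0 := by
          intro j hj
          rw [show pre ++ (c :: rest) = pre ++ run ++ rest' by rw [hcs, List.append_assoc]]
          exact cellVal_run pre run rest' j hrundig hpre hrest'h hj
        have hchunk := cellAsg_chunk y ((PySem.Int.ofChars? run).getD 0) run
          (pre ++ (c :: rest)) pre.length rest' hrundig hv
        have hih := ih rest' hrest'len (pre ++ run)
          (fun d hdm hdd => absurd hdd (by simp [hrest'h d hdm]))
        rw [show pre ++ run ++ rest' = pre ++ (c :: rest) by rw [hcs, List.append_assoc],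
            show (pre ++ run).length = pre.length + run.length by simp] at hih
        calc cellAsg y (pre ++ (c :: rest)) pre.length (c :: rest)
            = cellAsg y (pre ++ (c :: rest)) pre.length (run ++ rest') := by rw [← hcs]
          _ = (List.range run.length).map
                (fun j => (y, ((pre.length + j : Nat) : Int), (PySem.Int.ofChars? run).getD 0))
              ++ cellAsg y (pre ++ (c :: rest)) (pre.length + run.length) rest' := hchunk
          _ = runAsg y (pre.length : Int) run ++ asgB y (((pre.length + run.length : Nat)) : Int) rest' := by
              rw [hih]
              congr 1
              rw [runAsg, PySem.List.pyRange_one]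
              rw [show (((pre.length : Int) + (run.length : Nat)) - (pre.length : Int)).toNat
                    = run.length by omega]
              rw [List.map_map]
              apply List.map_congr_left
              intro j _
              simp only [Function.comp]
              congr 1
          _ = asgB y (pre.length : Int) (c :: rest) := by
              rw [asgB]
              simp only [hd, if_pos]
              rw [← hrundef, ← hrest'def]
              congr 2
      · -- a non-digit cell: skip it
        have hih := ih rest hrest (pre ++ [c])
          (fun d _ _ => Or.inr ⟨c, by simp, by simpa using hd⟩)
        rw [show (pre ++ [c]) ++ rest = pre ++ (c :: rest) by simp,
            show (pre ++ [c]).length = pre.length + 1 by simp] at hih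
        rw [asgB]
        simp only [hd]
        rw [show ((pre.length : Int) + 1) = ((pre.length + 1 : Nat) : Int) by push_cast; ring,
            ← hih]
        simp [cellAsg, hd]

-- one full line: A's state machine from a non-parsing state = B's per-cell fold
theorem line_eq (y : Int) (s : String) (parts : List (Int × Int × Int)) (r : Int) :
    ∃ r', (PySem.List.enumerate (s.toList ++ ['.']) 0).foldl
            (stepA (s.toList ++ ['.']) y) (parts, false, r)
          = ((PySem.List.enumerate s.toList 0).foldl
              (fun ps xc =>
                if PySem.Chars.isdigit xc.2 then
                  dinsert ps y xc.1 (cellVal s.toList xc.1.toNat)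
                else ps) parts, false, r') := by
  have hend : endsND (s.toList ++ ['.']) := by
    intro d hdl
    rw [List.getLast?_concat] at hdl
    cases hdl
    decide
  obtain ⟨r', hr⟩ := (machineA (s.toList ++ ['.']).length (s.toList ++ ['.']) le_rfl).1 y []
    parts r hend
  refine ⟨r', ?_⟩
  simp only [List.nil_append, List.length_nil, Nat.cast_zero] at hr
  rw [hr]
  have hB := foldB_eq y s.toList s.toList 0 parts
  rw [show ((0:Nat):Int) = 0 by simp] at hB
  rw [hB]
  have hC := cellAsg_eq_asgB y s.toList.length s.toList le_rfl [] (by intro _ _ _; exact Or.inl rfl)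
  simp only [List.nil_append, List.length_nil, Nat.cast_zero] at hC
  rw [hC, (asgB_eq_asg s.toList.length s.toList le_rfl).1]

-- the whole input: fold over enumerated lines
theorem outer_eq : ∀ (lines : List String) (k : Int) (parts : List (Int × Int × Int)) (r : Int),
    ((PySem.List.enumerate lines k).foldl
        (fun st yl =>
          (PySem.List.enumerate (yl.2.toList ++ ['.']) 0).foldl
            (stepA (yl.2.toList ++ ['.']) yl.1) st)
        (parts, false, r)).1
      = (PySem.List.enumerate lines k).foldl
          (fun ps yl =>
            (PySem.List.enumerate yl.2.toList 0).foldl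
              (fun ps xc =>
                if PySem.Chars.isdigit xc.2 then
                  dinsert ps yl.1 xc.1 (cellVal yl.2.toList xc.1.toNat)
                else ps) ps) parts := by
  intro lines
  induction lines with
  | nil => intro k parts r; simp [PySem.List.enumerate]
  | cons s rest ih =>
    intro k parts r
    rw [PySem.List.enumerate_cons, List.foldl_cons, List.foldl_cons]
    obtain ⟨r', hr⟩ := line_eq k s parts r
    simp only []
    rw [hr]
    exact ih (k + 1) _ r'

-- ===== VERDICT (by name: the statement is the Claim_ definition above) =====
theorem number_coordinates_spec : Claim_equal_number_coordinates := by
  intro input_lines _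
  unfold Spec_number_coordinates number_coordinates number_coordinates_alt
  exact outer_eq input_lines 0 [] (-1)
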